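-- pv_equiv track=rewrite | github.com/6ixmindslabs-hue/ATTENDANCE-SYSTEM | backend/main.py | resolve_overall_day_status
-- ===== SOURCE A (Python) =====
-- from typing import Iterable, Optional
--
-- PRESENT_STATUSES = {"present", "late"}
--
-- NON_COUNTED_SESSION_STATUSES = {"pending", "no_session", "attendance_not_conducted"}
--
-- def normalize_status(status_value: Optional[str]) -> str:
--     return (status_value or "").strip().lower()
--
-- def resolve_overall_day_status(morning_status: str, afternoon_status: str) -> str:
--     statuses = [normalize_status(morning_status), normalize_status(afternoon_status)]
--
--     if all(status == "attendance_not_conducted" for status in statuses):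
--         return "attendance_not_conducted"
--     if all(status in {"attendance_not_conducted", "no_session"} for status in statuses) and "attendance_not_conducted" in statuses:
--         return "attendance_not_conducted"
--     if all(status == "no_session" for status in statuses):
--         return "no_session"
--     if any(status == "pending" for status in statuses) and any(is_presentish(status) for status in statuses):
--         return "partial"
--     if any(is_presentish(status) for status in statuses):
--         if all(is_presentish(status) for status in statuses if status not in NON_COUNTED_SESSION_STATUSES):
--             if "late" in statuses and "present" not in statuses:
--                 return "late"
--             return "present"
--         return "partial"
--     if any(status == "pending" for status in statuses):
--         return "pending"
--     return "absent"
--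
-- def is_presentish(status_value: str) -> bool:
--     return normalize_status(status_value) in PRESENT_STATUSES
-- ===== SOURCE B (Python) =====
-- _SPECIAL = ("attendance_not_conducted", "no_session", "pending", "present", "late")
--
-- def _category(status_value):
--     s = (status_value or "").strip().lower()
--     return s if s in _SPECIAL else "other"
--
-- # Precomputed decision table over the unordered pair of categories (key sorted).
-- _DAY_TABLE = {
--     ("attendance_not_conducted", "attendance_not_conducted"): "attendance_not_conducted",
--     ("attendance_not_conducted", "late"): "late",
--     ("attendance_not_conducted", "no_session"): "attendance_not_conducted",
--     ("attendance_not_conducted", "other"): "absent",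
--     ("attendance_not_conducted", "pending"): "pending",
--     ("attendance_not_conducted", "present"): "present",
--     ("late", "late"): "late",
--     ("late", "no_session"): "late",
--     ("late", "other"): "partial",
--     ("late", "pending"): "partial",
--     ("late", "present"): "present",
--     ("no_session", "no_session"): "no_session",
--     ("no_session", "other"): "absent",
--     ("no_session", "pending"): "pending",
--     ("no_session", "present"): "present",
--     ("other", "other"): "absent",
--     ("other", "pending"): "pending",
--     ("other", "present"): "partial",
--     ("pending", "pending"): "pending",
--     ("pending", "present"): "partial",
--     ("present", "present"): "present",
-- }
--
-- def resolve_overall_day_status(morning_status, afternoon_status):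
--     c1 = _category(morning_status)
--     c2 = _category(afternoon_status)
--     key = (c1, c2) if c1 <= c2 else (c2, c1)
--     return _DAY_TABLE[key]
-- ===== Notes on version B (the rewrite author's own statement) =====
-- stated objective: alternative
-- what changed: A decides by a cascade of all/any/filter re-scans of the status list with a different predicate per rule; B classifies each status once into one of six categories and returns the answer by a single lookup in a precomputed 21-entry table keyed on the sorted category pair, with no decision branching.
import Mathlib
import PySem

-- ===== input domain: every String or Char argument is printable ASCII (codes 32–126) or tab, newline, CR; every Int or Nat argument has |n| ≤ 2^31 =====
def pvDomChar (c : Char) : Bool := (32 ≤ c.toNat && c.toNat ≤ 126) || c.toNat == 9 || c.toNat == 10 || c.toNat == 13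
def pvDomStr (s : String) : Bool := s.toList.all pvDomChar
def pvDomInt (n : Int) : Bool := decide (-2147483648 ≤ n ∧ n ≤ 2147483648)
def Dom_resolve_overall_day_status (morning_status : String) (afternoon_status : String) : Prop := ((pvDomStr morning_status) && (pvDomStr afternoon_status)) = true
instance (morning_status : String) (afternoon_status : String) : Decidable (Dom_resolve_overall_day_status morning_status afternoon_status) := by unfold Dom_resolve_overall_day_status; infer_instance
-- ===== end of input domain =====

-- B replaces A's cascade of all/any/filter re-scans by one categorisation of each status and a single
-- lookup in a precomputed table keyed on the sorted category pair (objective: alternative; same cost).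

-- ===== PORT A =====
-- normalize_status: `status_value or ""` is the identity on a str argument (the port takes String, never None)
def pv_normalize_status (status_value : String) : String :=
  PySem.Str.lower (PySem.Str.strip status_value)

-- is_presentish: membership in the literal set {"present", "late"} ported as an equality disjunction (exact)
def pv_is_presentish (status_value : String) : Bool :=
  pv_normalize_status status_value == "present" || pv_normalize_status status_value == "late"

def resolve_overall_day_status (morning_status : String) (afternoon_status : String) : String :=
  let statuses : List String := [pv_normalize_status morning_status, pv_normalize_status afternoon_status]
  if statuses.all (fun status => status == "attendance_not_conducted") then
    "attendance_not_conducted"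
  else if statuses.all (fun status => status == "attendance_not_conducted" || status == "no_session")
          && statuses.contains "attendance_not_conducted" then
    "attendance_not_conducted"
  else if statuses.all (fun status => status == "no_session") then
    "no_session"
  else if statuses.any (fun status => status == "pending") && statuses.any (fun status => pv_is_presentish status) then
    "partial"
  else if statuses.any (fun status => pv_is_presentish status) then
    -- `all(… for status in statuses if status not in NON_COUNTED_SESSION_STATUSES)` = filter then all
    if (statuses.filter (fun status =>
          !(status == "pending" || status == "no_session" || status == "attendance_not_conducted"))).all
        (fun status => pv_is_presentish status) then
      if statuses.contains "late" && !(statuses.contains "present") then "late" else "present"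
    else "partial"
  else if statuses.any (fun status => status == "pending") then "pending"
  else "absent"

-- ===== PORT B =====
-- _category: `s in _SPECIAL` ported as an equality disjunction (exact)
def pv_category (status_value : String) : String :=
  let s := PySem.Str.lower (PySem.Str.strip status_value)
  if s == "attendance_not_conducted" || s == "no_session" || s == "pending" || s == "present" || s == "late"
  then s else "other"

-- _DAY_TABLE: the precomputed decision table, a literal dict keyed on the sorted category pair
def pv_day_table : PySem.Dict (String × String) String := PySem.Dict.mk
  [ (("attendance_not_conducted", "attendance_not_conducted"), "attendance_not_conducted"),
    (("attendance_not_conducted", "late"), "late"),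
    (("attendance_not_conducted", "no_session"), "attendance_not_conducted"),
    (("attendance_not_conducted", "other"), "absent"),
    (("attendance_not_conducted", "pending"), "pending"),
    (("attendance_not_conducted", "present"), "present"),
    (("late", "late"), "late"),
    (("late", "no_session"), "late"),
    (("late", "other"), "partial"),
    (("late", "pending"), "partial"),
    (("late", "present"), "present"),
    (("no_session", "no_session"), "no_session"),
    (("no_session", "other"), "absent"),
    (("no_session", "pending"), "pending"),
    (("no_session", "present"), "present"),
    (("other", "other"), "absent"),
    (("other", "pending"), "pending"),
    (("other", "present"), "partial"),
    (("pending", "pending"), "pending"),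
    (("pending", "present"), "partial"),
    (("present", "present"), "present") ]

def resolve_overall_day_status_alt (morning_status : String) (afternoon_status : String) : String :=
  let c1 := pv_category morning_status
  let c2 := pv_category afternoon_status
  let key := if c1 ≤ c2 then (c1, c2) else (c2, c1)
  -- `_DAY_TABLE[key]`: the key is always present (categories form a closed six-element set and the
  -- table holds every sorted pair), so the KeyError branch is unreachable; ported with getD
  PySem.Dict.getD pv_day_table key "absent"

-- ===== PRECONDITION & SPEC =====
def Spec_resolve_overall_day_status (morning_status : String) (afternoon_status : String) (out : String) : Prop := out = resolve_overall_day_status_alt morning_status afternoon_status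
instance (morning_status : String) (afternoon_status : String) (out : String) : Decidable (Spec_resolve_overall_day_status morning_status afternoon_status out) := by unfold Spec_resolve_overall_day_status; infer_instance

-- ===== CLAIM (what is proved, stated in full; the proofs are below) =====
def Claim_equal_resolve_overall_day_status : Prop := ∀ (morning_status : String) (afternoon_status : String), Dom_resolve_overall_day_status morning_status afternoon_status → Spec_resolve_overall_day_status morning_status afternoon_status (resolve_overall_day_status morning_status afternoon_status)

-- ===== LEMMAS AND PROOFS =====

lemma pv_isupper_iff (c : Char) : PySem.Chars.isupper c = true ↔ 65 ≤ c.toNat ∧ c.toNat ≤ 90 := by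
  simp only [PySem.Chars.isupper, Bool.and_eq_true, decide_eq_true_eq, Char.le_def,
    UInt32.le_iff_toNat_le]
  exact Iff.rfl

lemma pv_toNat_lowerChar (c : Char) (h : PySem.Chars.isupper c = true) :
    (PySem.Chars.lowerChar c).toNat = c.toNat + 32 := by
  have hc := (pv_isupper_iff c).mp h
  have hv : (c.toNat + 32).isValidChar := by left; omega
  simp [PySem.Chars.lowerChar, h, Char.toNat_ofNat, hv]

lemma pv_isspace_false_of (d : Char) (h1 : 33 ≤ d.toNat) (h2 : d.toNat ≤ 126) :
    PySem.Chars.isspace d = false := by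
  simp only [PySem.Chars.isspace, Bool.or_eq_false_iff, Bool.and_eq_false_iff,
    decide_eq_false_iff_not]
  omega

lemma pv_isspace_lowerChar (c : Char) :
    PySem.Chars.isspace (PySem.Chars.lowerChar c) = PySem.Chars.isspace c := by
  by_cases h : PySem.Chars.isupper c = true
  · have hc := (pv_isupper_iff c).mp h
    have ht := pv_toNat_lowerChar c h
    rw [pv_isspace_false_of _ (by omega) (by omega), pv_isspace_false_of _ (by omega) (by omega)]
  · simp [PySem.Chars.lowerChar, h]

lemma pv_lowerChar_idem (c : Char) :
    PySem.Chars.lowerChar (PySem.Chars.lowerChar c) = PySem.Chars.lowerChar c := by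
  by_cases h : PySem.Chars.isupper c = true
  · have hc := (pv_isupper_iff c).mp h
    have ht := pv_toNat_lowerChar c h
    have hl : PySem.Chars.isupper (PySem.Chars.lowerChar c) = false := by
      rw [Bool.eq_false_iff]
      intro hu
      have := (pv_isupper_iff _).mp hu
      omega
    rw [show PySem.Chars.lowerChar (PySem.Chars.lowerChar c)
          = if PySem.Chars.isupper (PySem.Chars.lowerChar c) = true
            then Char.ofNat ((PySem.Chars.lowerChar c).toNat + 32) else PySem.Chars.lowerChar c
        from rfl, hl]
    simp
  · have h' : PySem.Chars.lowerChar c = c := by simp [PySem.Chars.lowerChar, h]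
    rw [h', h']

lemma pv_lower_idem (l : List Char) :
    PySem.Chars.lower (PySem.Chars.lower l) = PySem.Chars.lower l := by
  simp [PySem.Chars.lower, List.map_map, Function.comp_def, pv_lowerChar_idem]

lemma pv_strip_lower (l : List Char) :
    PySem.Chars.strip (PySem.Chars.lower l) = PySem.Chars.lower (PySem.Chars.strip l) := by
  have hfun : (fun c => PySem.Chars.isspace (PySem.Chars.lowerChar c)) = PySem.Chars.isspace :=
    funext pv_isspace_lowerChar
  simp [PySem.Chars.strip, PySem.Chars.lstrip, PySem.Chars.rstrip, PySem.Chars.lower,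
    ← List.map_reverse, List.dropWhile_map, Function.comp_def, hfun]

lemma pv_strip_idem (l : List Char) :
    PySem.Chars.strip (PySem.Chars.strip l) = PySem.Chars.strip l := by
  have e1 : ∀ u : List Char, PySem.Chars.rstrip u = List.rdropWhile PySem.Chars.isspace u :=
    fun _ => rfl
  simp only [PySem.Chars.strip, PySem.Chars.lstrip, e1]
  set p := PySem.Chars.isspace
  set t := List.dropWhile p l with ht
  have hdw : List.dropWhile p t = t := by rw [ht]; exact List.dropWhile_idempotent _ _
  have h1 : List.dropWhile p (List.rdropWhile p t) = List.rdropWhile p t := by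
    rw [List.dropWhile_eq_self_iff]
    intro hl
    obtain ⟨r, hr⟩ := List.rdropWhile_prefix (p := p) (l := t)
    have ht0 : 0 < t.length := by
      rw [← hr, List.length_append]
      omega
    have e := List.getElem_of_eq hr.symm ht0
    rw [List.getElem_append_left hl] at e
    rw [← e]
    exact List.dropWhile_eq_self_iff.mp hdw ht0
  rw [h1, List.rdropWhile_idempotent]

-- normalize_status is idempotent
lemma pv_normalize_idem (s : String) :
    pv_normalize_status (pv_normalize_status s) = pv_normalize_status s := by
  unfold pv_normalize_status
  refine String.toList_inj.mp ?_
  simp only [PySem.Str.toList_lower, PySem.Str.toList_strip]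
  rw [pv_strip_lower, pv_lower_idem, pv_strip_idem]

-- on an already-normalized string, is_presentish is a plain comparison
lemma pv_presentish_norm (x : String) :
    pv_is_presentish (pv_normalize_status x)
      = ((pv_normalize_status x == "present") || (pv_normalize_status x == "late")) := by
  unfold pv_is_presentish
  rw [pv_normalize_idem]

lemma pv_category_eq (x : String) : pv_category x =
    (if pv_normalize_status x == "attendance_not_conducted" || pv_normalize_status x == "no_session"
        || pv_normalize_status x == "pending" || pv_normalize_status x == "present"
        || pv_normalize_status x == "late"
     then pv_normalize_status x else "other") := rfl

lemma pv_case (x : String) :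
    (((pv_normalize_status x == "attendance_not_conducted") = true ∧
      ("attendance_not_conducted" == pv_normalize_status x) = true ∧
      (pv_normalize_status x == "no_session") = false ∧
      ("no_session" == pv_normalize_status x) = false ∧
      (pv_normalize_status x == "pending") = false ∧
      ("pending" == pv_normalize_status x) = false ∧
      (pv_normalize_status x == "present") = false ∧
      ("present" == pv_normalize_status x) = false ∧
      (pv_normalize_status x == "late") = false ∧
      ("late" == pv_normalize_status x) = false) ∧
     pv_category x = "attendance_not_conducted" ∧ pv_is_presentish (pv_normalize_status x) = false) ∨
    (((pv_normalize_status x == "attendance_not_conducted") = false ∧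
      ("attendance_not_conducted" == pv_normalize_status x) = false ∧
      (pv_normalize_status x == "no_session") = true ∧
      ("no_session" == pv_normalize_status x) = true ∧
      (pv_normalize_status x == "pending") = false ∧
      ("pending" == pv_normalize_status x) = false ∧
      (pv_normalize_status x == "present") = false ∧
      ("present" == pv_normalize_status x) = false ∧
      (pv_normalize_status x == "late") = false ∧
      ("late" == pv_normalize_status x) = false) ∧
     pv_category x = "no_session" ∧ pv_is_presentish (pv_normalize_status x) = false) ∨
    (((pv_normalize_status x == "attendance_not_conducted") = false ∧
      ("attendance_not_conducted" == pv_normalize_status x) = false ∧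
      (pv_normalize_status x == "no_session") = false ∧
      ("no_session" == pv_normalize_status x) = false ∧
      (pv_normalize_status x == "pending") = true ∧
      ("pending" == pv_normalize_status x) = true ∧
      (pv_normalize_status x == "present") = false ∧
      ("present" == pv_normalize_status x) = false ∧
      (pv_normalize_status x == "late") = false ∧
      ("late" == pv_normalize_status x) = false) ∧
     pv_category x = "pending" ∧ pv_is_presentish (pv_normalize_status x) = false) ∨
    (((pv_normalize_status x == "attendance_not_conducted") = false ∧
      ("attendance_not_conducted" == pv_normalize_status x) = false ∧
      (pv_normalize_status x == "no_session") = false ∧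
      ("no_session" == pv_normalize_status x) = false ∧
      (pv_normalize_status x == "pending") = false ∧
      ("pending" == pv_normalize_status x) = false ∧
      (pv_normalize_status x == "present") = true ∧
      ("present" == pv_normalize_status x) = true ∧
      (pv_normalize_status x == "late") = false ∧
      ("late" == pv_normalize_status x) = false) ∧
     pv_category x = "present" ∧ pv_is_presentish (pv_normalize_status x) = true) ∨
    (((pv_normalize_status x == "attendance_not_conducted") = false ∧
      ("attendance_not_conducted" == pv_normalize_status x) = false ∧
      (pv_normalize_status x == "no_session") = false ∧
      ("no_session" == pv_normalize_status x) = false ∧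
      (pv_normalize_status x == "pending") = false ∧
      ("pending" == pv_normalize_status x) = false ∧
      (pv_normalize_status x == "present") = false ∧
      ("present" == pv_normalize_status x) = false ∧
      (pv_normalize_status x == "late") = true ∧
      ("late" == pv_normalize_status x) = true) ∧
     pv_category x = "late" ∧ pv_is_presentish (pv_normalize_status x) = true) ∨
    (((pv_normalize_status x == "attendance_not_conducted") = false ∧
      ("attendance_not_conducted" == pv_normalize_status x) = false ∧
      (pv_normalize_status x == "no_session") = false ∧
      ("no_session" == pv_normalize_status x) = false ∧
      (pv_normalize_status x == "pending") = false ∧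
      ("pending" == pv_normalize_status x) = false ∧
      (pv_normalize_status x == "present") = false ∧
      ("present" == pv_normalize_status x) = false ∧
      (pv_normalize_status x == "late") = false ∧
      ("late" == pv_normalize_status x) = false) ∧
     pv_category x = "other" ∧ pv_is_presentish (pv_normalize_status x) = false) := by
  by_cases h0 : pv_normalize_status x = "attendance_not_conducted"
  · exact Or.inl ⟨⟨by rw [h0]; rfl, by rw [h0]; rfl, by rw [h0]; rfl, by rw [h0]; rfl, by rw [h0]; rfl, by rw [h0]; rfl, by rw [h0]; rfl, by rw [h0]; rfl, by rw [h0]; rfl, by rw [h0]; rfl⟩, by rw [pv_category_eq, h0]; rfl, by rw [pv_presentish_norm, h0]; rfl⟩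
  by_cases h1 : pv_normalize_status x = "no_session"
  · exact Or.inr (Or.inl ⟨⟨by rw [h1]; rfl, by rw [h1]; rfl, by rw [h1]; rfl, by rw [h1]; rfl, by rw [h1]; rfl, by rw [h1]; rfl, by rw [h1]; rfl, by rw [h1]; rfl, by rw [h1]; rfl, by rw [h1]; rfl⟩, by rw [pv_category_eq, h1]; rfl, by rw [pv_presentish_norm, h1]; rfl⟩)
  by_cases h2 : pv_normalize_status x = "pending"
  · exact Or.inr (Or.inr (Or.inl ⟨⟨by rw [h2]; rfl, by rw [h2]; rfl, by rw [h2]; rfl, by rw [h2]; rfl, by rw [h2]; rfl, by rw [h2]; rfl, by rw [h2]; rfl, by rw [h2]; rfl, by rw [h2]; rfl, by rw [h2]; rfl⟩, by rw [pv_category_eq, h2]; rfl, by rw [pv_presentish_norm, h2]; rfl⟩))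
  by_cases h3 : pv_normalize_status x = "present"
  · exact Or.inr (Or.inr (Or.inr (Or.inl ⟨⟨by rw [h3]; rfl, by rw [h3]; rfl, by rw [h3]; rfl, by rw [h3]; rfl, by rw [h3]; rfl, by rw [h3]; rfl, by rw [h3]; rfl, by rw [h3]; rfl, by rw [h3]; rfl, by rw [h3]; rfl⟩, by rw [pv_category_eq, h3]; rfl, by rw [pv_presentish_norm, h3]; rfl⟩)))
  by_cases h4 : pv_normalize_status x = "late"
  · exact Or.inr (Or.inr (Or.inr (Or.inr (Or.inl ⟨⟨by rw [h4]; rfl, by rw [h4]; rfl, by rw [h4]; rfl, by rw [h4]; rfl, by rw [h4]; rfl, by rw [h4]; rfl, by rw [h4]; rfl, by rw [h4]; rfl, by rw [h4]; rfl, by rw [h4]; rfl⟩, by rw [pv_category_eq, h4]; rfl, by rw [pv_presentish_norm, h4]; rfl⟩))))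
  · refine Or.inr (Or.inr (Or.inr (Or.inr (Or.inr (⟨⟨beq_eq_false_iff_ne.mpr h0, beq_eq_false_iff_ne.mpr (fun e => h0 e.symm), beq_eq_false_iff_ne.mpr h1, beq_eq_false_iff_ne.mpr (fun e => h1 e.symm), beq_eq_false_iff_ne.mpr h2, beq_eq_false_iff_ne.mpr (fun e => h2 e.symm), beq_eq_false_iff_ne.mpr h3, beq_eq_false_iff_ne.mpr (fun e => h3 e.symm), beq_eq_false_iff_ne.mpr h4, beq_eq_false_iff_ne.mpr (fun e => h4 e.symm)⟩, ?_, ?_⟩)))))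
    · rw [pv_category_eq, beq_eq_false_iff_ne.mpr h0, beq_eq_false_iff_ne.mpr h1,
        beq_eq_false_iff_ne.mpr h2, beq_eq_false_iff_ne.mpr h3, beq_eq_false_iff_ne.mpr h4]; rfl
    · rw [pv_presentish_norm, beq_eq_false_iff_ne.mpr h3, beq_eq_false_iff_ne.mpr h4]; rfl

-- B's result depends only on the two category labels
lemma pv_alt_eq (m a : String) :
    resolve_overall_day_status_alt m a
      = PySem.Dict.getD pv_day_table
          (if pv_category m ≤ pv_category a then (pv_category m, pv_category a)
           else (pv_category a, pv_category m)) "absent" := rfl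

-- ===== VERDICT (by name: the statement is the Claim_ definition above) =====
set_option maxHeartbeats 1000000 in
theorem resolve_overall_day_status_spec : Claim_equal_resolve_overall_day_status := by
  unfold Claim_equal_resolve_overall_day_status Spec_resolve_overall_day_status
  intro m a _
  rw [pv_alt_eq]
  unfold resolve_overall_day_status
  simp only [List.all_cons, List.all_nil, List.any_cons, List.any_nil, List.contains_cons,
    List.contains_nil, List.filter_cons, List.filter_nil]
  rcases pv_case m with ⟨h1, h2, h3⟩|⟨h1, h2, h3⟩|⟨h1, h2, h3⟩|⟨h1, h2, h3⟩|⟨h1, h2, h3⟩|⟨h1, h2, h3⟩ <;>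
    rcases pv_case a with ⟨g1, g2, g3⟩|⟨g1, g2, g3⟩|⟨g1, g2, g3⟩|⟨g1, g2, g3⟩|⟨g1, g2, g3⟩|⟨g1, g2, g3⟩ <;>
      simp only [h1.1, h1.2.1, h1.2.2.1, h1.2.2.2.1, h1.2.2.2.2.1, h1.2.2.2.2.2.1, h1.2.2.2.2.2.2.1, h1.2.2.2.2.2.2.2.1, h1.2.2.2.2.2.2.2.2.1, h1.2.2.2.2.2.2.2.2.2, g1.1, g1.2.1, g1.2.2.1, g1.2.2.2.1, g1.2.2.2.2.1, g1.2.2.2.2.2.1, g1.2.2.2.2.2.2.1, g1.2.2.2.2.2.2.2.1, g1.2.2.2.2.2.2.2.2.1, g1.2.2.2.2.2.2.2.2.2, h2, g2, h3, g3,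
        Bool.true_and, Bool.false_and, Bool.and_true, Bool.and_false, Bool.true_or, Bool.or_true,
        Bool.false_or, Bool.or_false, Bool.not_true, Bool.not_false, Bool.and_self, Bool.or_self,
        List.all_cons, List.all_nil, reduceIte, String.reduceBEq, beq_self_eq_true, ite_self, Bool.false_eq_true, Bool.true_eq_false] <;>
      first
        | (simp [pv_day_table, PySem.Dict.getD, PySem.Dict.get?_mk_cons]; done)
        | (rw [if_pos (by simp; decide)]; simp [pv_day_table, PySem.Dict.getD, PySem.Dict.get?_mk_cons])
        | (rw [if_neg (by simp; decide)]; simp [pv_day_table, PySem.Dict.getD, PySem.Dict.get?_mk_cons])
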